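-- pv_equiv track=rewrite | github.com/hchiam/cognateLanguage | geneticAlgorithm/geneticAlgo.py | penalizeConsonantClusters
-- ===== SOURCE A (Python) =====
-- def penalizeConsonantClusters(word):
--     score = 0
--     consonantClusterLength = 0
--     for letter in word:
--         if letter not in 'aeiou':
--             consonantClusterLength += 1
--         else:
--             if consonantClusterLength > 1:
--                 score -= consonantClusterLength
--             consonantClusterLength = 0
--     # in case the word ends with a consonant:
--     score -= consonantClusterLength
--     return score
-- ===== SOURCE B (Python) =====
-- def penalizeConsonantClusters(word):
--     # pass 1: run-length encode into [(is_vowel, length), ...]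
--     runs = []
--     for letter in word:
--         v = letter in 'aeiou'
--         if runs and runs[-1][0] == v:
--             runs[-1] = (v, runs[-1][1] + 1)
--         else:
--             runs.append((v, 1))
--     # pass 2: score the runs; the final run is special-cased
--     score = 0
--     for i, (v, k) in enumerate(runs):
--         if (not v) and (k > 1 or i == len(runs) - 1):
--             score -= k
--     return score
-- ===== Notes on version B (the rewrite author's own statement) =====
-- stated objective: alternative
-- what changed: B first run-length-encodes the word into (is_vowel, length) groups and then scores the groups in a second pass that special-cases the final group, instead of A's single pass with an incremental cluster counter flushed on vowels and after the loop.
import Mathlib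
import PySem

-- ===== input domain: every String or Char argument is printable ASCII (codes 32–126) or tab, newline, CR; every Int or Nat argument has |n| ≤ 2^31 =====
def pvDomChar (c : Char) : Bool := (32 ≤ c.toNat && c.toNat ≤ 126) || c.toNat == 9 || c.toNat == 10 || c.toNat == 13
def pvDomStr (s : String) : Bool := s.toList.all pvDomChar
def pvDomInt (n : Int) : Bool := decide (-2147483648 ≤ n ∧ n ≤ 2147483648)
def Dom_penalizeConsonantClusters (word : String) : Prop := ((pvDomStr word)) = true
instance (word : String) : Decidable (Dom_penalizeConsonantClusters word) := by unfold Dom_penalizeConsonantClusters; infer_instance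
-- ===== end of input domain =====

-- B replaces A's incremental consonant-cluster counter with a run-length encoding of the word
-- followed by a second scoring pass over the runs (alternative decomposition, same cost).


-- ===== PORT A =====
-- loop state (score, consonantClusterLength); 'letter not in "aeiou"' = char not among the five vowels
def pccStep (p : Int × Int) (c : Char) : Int × Int :=
  if !(['a','e','i','o','u'].contains c) then (p.1, p.2 + 1)
  else (if p.2 > 1 then p.1 - p.2 else p.1, 0)

def penalizeConsonantClusters (word : String) : Int :=
  let st := word.toList.foldl pccStep (0, 0)
  st.1 - st.2

-- ===== PORT B =====
-- pass 1 of Source B: the runs list is built by a forward loop; the Lean accumulator keeps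
-- python's list reversed (head = python's runs[-1], appending/merging at the tail becomes
-- prepending/merging at the head), and is reversed once after the loop
def pccRunStep (acc : List (Bool × Nat)) (c : Char) : List (Bool × Nat) :=
  let v : Bool := ['a','e','i','o','u'].contains c
  match acc with
  | (v', n) :: t => if v' = v then (v, n + 1) :: t else (v, 1) :: (v', n) :: t
  | [] => [(v, 1)]

def penalizeConsonantClusters_alt (word : String) : Int :=
  let rs := (word.toList.foldl pccRunStep []).reverse
  rs.zipIdx.foldl
    (fun s x =>
      if x.1.1 = false ∧ (x.1.2 > 1 ∨ x.2 = rs.length - 1) then s - (x.1.2 : Int) else s)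
    0

-- ===== PRECONDITION & SPEC =====
def Spec_penalizeConsonantClusters (word : String) (out : Int) : Prop := out = penalizeConsonantClusters_alt word
instance (word : String) (out : Int) : Decidable (Spec_penalizeConsonantClusters word out) := by unfold Spec_penalizeConsonantClusters; infer_instance

-- ===== CLAIM (what is proved, stated in full; the proofs are below) =====
def Claim_equal_penalizeConsonantClusters : Prop := ∀ (word : String), Dom_penalizeConsonantClusters word → Spec_penalizeConsonantClusters word (penalizeConsonantClusters word)

-- ===== LEMMAS AND PROOFS =====

-- proof-side helper: the same runs list, by front recursion
def pccRuns : List Char → List (Bool × Nat)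
  | [] => []
  | c :: rest =>
    let v : Bool := ['a','e','i','o','u'].contains c
    match pccRuns rest with
    | (v', n) :: t => if v = v' then (v, n + 1) :: t else (v, 1) :: (v', n) :: t
    | [] => [(v, 1)]

-- common intermediate value: score of a run list, final group special-cased
def gScore : List (Bool × Nat) → Int
  | [] => 0
  | (v, k) :: [] => if v then 0 else -(k : Int)
  | (v, k) :: t => (if v = false ∧ k > 1 then -(k : Int) else 0) + gScore t

-- A's loop as a recursion on the remaining letters, with pending cluster length n
def aval : Nat → List Char → Int
  | n, [] => -(n : Int)
  | n, c :: rest =>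
    if !(['a','e','i','o','u'].contains c) then aval (n + 1) rest
    else (if n > 1 then -(n : Int) else 0) + aval 0 rest

-- prepend a consonant run of length n, merging with a leading consonant run
def consPre (n : Nat) (rs : List (Bool × Nat)) : List (Bool × Nat) :=
  if n = 0 then rs
  else match rs with
    | (false, k) :: t => (false, n + k) :: t
    | _ => (false, n) :: rs

lemma foldl_pccStep (l : List Char) : ∀ (s : Int) (n : Nat),
    (l.foldl pccStep (s, (n : Int))).1 - (l.foldl pccStep (s, (n : Int))).2 = s + aval n l := by
  induction l with
  | nil => intro s n; simp [aval]; ring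
  | cons c rest ih =>
    intro s n
    by_cases h : (['a','e','i','o','u'].contains c) = true
    · have hs : pccStep (s, (n : Int)) c = ((if (n : Int) > 1 then s - n else s), 0) := by
        simp only [pccStep, h, Bool.not_true, Bool.false_eq_true, if_false]
      have h0 := ih (if (n : Int) > 1 then s - n else s) 0
      simp only [Nat.cast_zero] at h0
      simp only [List.foldl_cons, hs, h0, aval, h, Bool.not_true, Bool.false_eq_true, if_false]
      by_cases hn : n > 1
      · have hn' : ((n : Int) > 1) := by exact_mod_cast hn
        simp only [if_pos hn, if_pos hn']
        ring
      · have hn' : ¬ ((n : Int) > 1) := by exact_mod_cast hn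
        simp [hn, hn']
    · have h' : (['a','e','i','o','u'].contains c) = false := by
        simp only [Bool.not_eq_true] at h; exact h
      have hs : pccStep (s, (n : Int)) c = (s, ((n + 1 : Nat) : Int)) := by
        simp only [pccStep, h', Bool.not_false, if_true]; push_cast; ring
      have h1 := ih s (n + 1)
      simp only [List.foldl_cons, hs, h1, aval, h', Bool.not_false, if_true]

lemma pccRuns_cons_consonant (c : Char) (rest : List Char)
    (h : (['a','e','i','o','u'].contains c) = false) :
    pccRuns (c :: rest) = consPre 1 (pccRuns rest) := by
  cases hr : pccRuns rest with
  | nil => simp only [pccRuns, h, hr, consPre, if_neg (by omega : (1 : Nat) ≠ 0)]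
  | cons p t =>
    obtain ⟨v', n⟩ := p
    cases v' with
    | false =>
      simp only [pccRuns, h, hr, consPre, if_neg (by omega : (1 : Nat) ≠ 0)]
      simp [Nat.add_comm]
    | true =>
      simp only [pccRuns, h, hr, consPre, if_neg (by omega : (1 : Nat) ≠ 0)]
      simp

lemma consPre_consPre (n : Nat) (rs : List (Bool × Nat)) :
    consPre n (consPre 1 rs) = consPre (n + 1) rs := by
  cases rs with
  | nil => cases n <;> simp [consPre]
  | cons p t =>
    obtain ⟨v, k⟩ := p
    cases v <;> cases n <;> (simp [consPre]; try omega)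

lemma gScore_vowel_head (k : Nat) (t : List (Bool × Nat)) :
    gScore ((true, k) :: t) = gScore t := by
  cases t <;> simp [gScore]

lemma gScore_consPre_vowel_head (n k : Nat) (t : List (Bool × Nat)) :
    gScore (consPre n ((true, k) :: t)) =
      (if n > 1 then -(n : Int) else 0) + gScore ((true, k) :: t) := by
  cases n with
  | zero => simp [consPre]
  | succ m =>
    by_cases hm : m + 1 > 1
    · simp [consPre, gScore, hm]
    · simp [consPre, gScore, hm]

lemma aval_eq_gScore (l : List Char) : ∀ (n : Nat),
    aval n l = gScore (consPre n (pccRuns l)) := by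
  induction l with
  | nil =>
    intro n
    cases n with
    | zero => simp [aval, pccRuns, consPre, gScore]
    | succ m => simp [aval, pccRuns, consPre, gScore]
  | cons c rest ih =>
    intro n
    by_cases h : (['a','e','i','o','u'].contains c) = true
    · -- vowel
      simp only [aval, h, Bool.not_true, Bool.false_eq_true, if_false]
      cases hr : pccRuns rest with
      | nil =>
        have heq : pccRuns (c :: rest) = [(true, 1)] := by
          simp only [pccRuns, h, hr]
        rw [heq, gScore_consPre_vowel_head, gScore_vowel_head]
        have h0 := ih 0
        rw [hr] at h0
        simp [consPre] at h0
        rw [h0]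
      | cons p t =>
        obtain ⟨v', k⟩ := p
        cases v' with
        | true =>
          have heq : pccRuns (c :: rest) = (true, k + 1) :: t := by
            simp only [pccRuns, h, hr]
            simp
          rw [heq, gScore_consPre_vowel_head, gScore_vowel_head]
          have h0 := ih 0
          rw [hr] at h0
          simp [consPre] at h0
          rw [h0, gScore_vowel_head]
        | false =>
          have heq : pccRuns (c :: rest) = (true, 1) :: (false, k) :: t := by
            simp only [pccRuns, h, hr]
            simp
          rw [heq, gScore_consPre_vowel_head, gScore_vowel_head]
          have h0 := ih 0
          rw [hr] at h0
          simp [consPre] at h0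
          rw [h0]
    · -- consonant
      have h' : (['a','e','i','o','u'].contains c) = false := by
        simpa using h
      simp only [aval, h', Bool.not_false, if_true]
      rw [pccRuns_cons_consonant c rest h', consPre_consPre]
      exact ih (n + 1)

lemma zipIdx_foldl_gScore (N : Nat) (t : List (Bool × Nat)) : ∀ (i : Nat) (s : Int),
    i + t.length = N →
    (t.zipIdx i).foldl
      (fun s x => if x.1.1 = false ∧ (x.1.2 > 1 ∨ x.2 = N - 1) then s - (x.1.2 : Int) else s)
      s = s + gScore t := by
  induction t with
  | nil => intro i s _; simp [gScore]
  | cons p t' ih =>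
    intro i s hN
    obtain ⟨v, k⟩ := p
    simp only [List.zipIdx_cons, List.foldl_cons]
    cases t' with
    | nil =>
      have hi : i = N - 1 := by simp at hN; omega
      simp only [List.zipIdx_nil, List.foldl_nil, gScore]
      cases v with
      | true => simp
      | false => simp [hi]; ring
    | cons q t'' =>
      have hi : i ≠ N - 1 := by simp at hN; omega
      have hN' : (i + 1) + (q :: t'').length = N := by simp at hN ⊢; omega
      cases v with
      | true =>
        rw [if_neg (by simp), ih (i + 1) s hN']
        simp [gScore]
      | false =>
        by_cases hk : k > 1
        · rw [if_pos (by simp [hk]), ih (i + 1) _ hN']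
          simp [gScore, hk]; ring
        · rw [if_neg (by simp [hk, hi]), ih (i + 1) s hN']
          simp [gScore, hk]


-- bridge: the foldl of pccRunStep builds pccRuns reversed
def headAbsorb (v : Bool) (n : Nat) : List (Bool × Nat) → List (Bool × Nat)
  | (v', k) :: t => if v = v' then (v, k + n) :: t else (v, n) :: (v', k) :: t
  | [] => [(v, n)]

lemma pccRuns_cons (c : Char) (rest : List Char) :
    pccRuns (c :: rest) = headAbsorb (['a','e','i','o','u'].contains c) 1 (pccRuns rest) := by
  simp only [pccRuns]
  cases pccRuns rest with
  | nil => simp [headAbsorb]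
  | cons p t => obtain ⟨v', k⟩ := p; simp [headAbsorb]

lemma headAbsorb_headAbsorb (v : Bool) (n : Nat) (rs : List (Bool × Nat)) :
    headAbsorb v n (headAbsorb v 1 rs) = headAbsorb v (n + 1) rs := by
  cases rs with
  | nil => simp [headAbsorb]; omega
  | cons p t =>
    obtain ⟨v', k⟩ := p
    by_cases h : v = v' <;> simp [headAbsorb, h] <;> omega

lemma foldl_pccRunStep (l : List Char) : ∀ (v : Bool) (n : Nat) (t : List (Bool × Nat)),
    l.foldl pccRunStep ((v, n) :: t) = (headAbsorb v n (pccRuns l)).reverse ++ t := by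
  induction l with
  | nil => intro v n t; simp [pccRuns, headAbsorb]
  | cons c rest ih =>
    intro v n t
    by_cases hv : v = (['a','e','i','o','u'].contains c)
    · have hstep : pccRunStep ((v, n) :: t) c = (v, n + 1) :: t := by
        simp only [pccRunStep]
        rw [if_pos hv, ← hv]
      rw [List.foldl_cons, hstep, ih, pccRuns_cons, ← hv, headAbsorb_headAbsorb]
    · have hstep : pccRunStep ((v, n) :: t) c
          = ((['a','e','i','o','u'].contains c), 1) :: (v, n) :: t := by
        simp only [pccRunStep]
        rw [if_neg hv]
      rw [List.foldl_cons, hstep, ih, pccRuns_cons]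
      generalize hu : (['a','e','i','o','u'].contains c) = u
      rw [hu] at hv
      cases hr : pccRuns rest with
      | nil => simp [headAbsorb, hv]
      | cons p t' =>
        obtain ⟨w, k⟩ := p
        by_cases hw : u = w
        · subst hw; simp [headAbsorb, hv]
        · simp [headAbsorb, hv, hw]

lemma foldl_pccRunStep_nil (l : List Char) :
    (l.foldl pccRunStep []).reverse = pccRuns l := by
  cases l with
  | nil => simp [pccRuns]
  | cons c rest =>
    have hstep : pccRunStep [] c = [((['a','e','i','o','u'].contains c), 1)] := by
      simp [pccRunStep]
    rw [List.foldl_cons, hstep,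
        foldl_pccRunStep rest (['a','e','i','o','u'].contains c) 1 [],
        List.append_nil, List.reverse_reverse, pccRuns_cons]

-- ===== VERDICT (by name: the statement is the Claim_ definition above) =====
theorem penalizeConsonantClusters_spec : Claim_equal_penalizeConsonantClusters := by
  intro word _
  show _ = _
  have hA : penalizeConsonantClusters word = gScore (pccRuns word.toList) := by
    have h0 := foldl_pccStep word.toList 0 0
    simp only [Nat.cast_zero] at h0
    have h1 := aval_eq_gScore word.toList 0
    simp [consPre] at h1
    simpa [penalizeConsonantClusters, h1] using h0
  have hB : penalizeConsonantClusters_alt word = gScore (pccRuns word.toList) := by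
    have hz := zipIdx_foldl_gScore (pccRuns word.toList).length (pccRuns word.toList) 0 0 (by simp)
    simpa [penalizeConsonantClusters_alt, foldl_pccRunStep_nil] using hz
  rw [hA, hB]
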